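-- pv_equiv track=rewrite | github.com/xiaowucn/Scriber-Backend | remarkable/plugins/predict/models/partial_text_v2.py | _split_text_by_boundary
-- ===== SOURCE A (Python) =====
-- def _split_text_by_boundary(text, boundary, side="left"):
--     if boundary:
--         parts = text.split(boundary)
--     else:
--         if side == "right":
--             parts = [text, ""]
--         else:
--             parts = ["", text]
--     if len(parts) > 1:
--         for i in range(1, len(parts)):
--             if side == "left":
--                 yield (boundary.join(parts[:i] + [""]), boundary.join(parts[i:]))
--             elif side == "right":
--                 yield (boundary.join(parts[:i]), boundary.join([""] + parts[i:]))
--             else: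
--                 raise Exception("undefined side")
-- ===== SOURCE B (Python) =====
-- def _split_text_by_boundary(text, boundary, side="left"):
--     if boundary:
--         parts = text.split(boundary)
--     else:
--         parts = [text, ""] if side == "right" else ["", text]
--     if len(parts) < 2:
--         return
--     if side != "left" and side != "right":
--         raise Exception("undefined side")
--     first, *rest = parts
--     mid, last = rest[:-1], rest[-1]
--     # running prefix joins: pres[j] = boundary.join(parts[:j+1])
--     pres = []
--     pre = first
--     for p in mid:
--         pres.append(pre)
--         pre = pre + boundary + p
--     pres.append(pre)
--     # suffix joins built back-to-front: sufs[j] = boundary.join(parts[j+1:])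
--     sufs = []
--     suf = last
--     for p in reversed(mid):
--         sufs.append(suf)
--         suf = p + boundary + suf
--     sufs.append(suf)
--     sufs.reverse()
--     if side == "left":
--         for pre, suf in zip(pres, sufs):
--             yield (pre + boundary, suf)
--     else:
--         for pre, suf in zip(pres, sufs):
--             yield (pre, boundary + suf)
-- ===== Notes on version B (the rewrite author's own statement) =====
-- stated objective: alternative
-- what changed: Instead of re-slicing the parts list and re-joining both halves for every split index, B makes one forward pass accumulating running prefix joins and one backward pass building suffix joins, then zips the two lists to yield the pairs; the raise/empty-boundary behaviour is kept.
import Mathlib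
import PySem

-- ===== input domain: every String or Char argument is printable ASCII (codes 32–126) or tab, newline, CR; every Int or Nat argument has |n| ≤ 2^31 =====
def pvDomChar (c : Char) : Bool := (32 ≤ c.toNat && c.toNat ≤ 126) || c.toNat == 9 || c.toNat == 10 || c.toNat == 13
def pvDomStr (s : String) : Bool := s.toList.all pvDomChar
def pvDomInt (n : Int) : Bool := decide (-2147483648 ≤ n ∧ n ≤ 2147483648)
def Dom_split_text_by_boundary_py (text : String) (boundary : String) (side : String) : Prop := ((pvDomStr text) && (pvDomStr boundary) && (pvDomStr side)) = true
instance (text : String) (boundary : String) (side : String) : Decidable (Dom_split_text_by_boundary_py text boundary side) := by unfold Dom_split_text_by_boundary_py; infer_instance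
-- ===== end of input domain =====

-- B replaces A's per-index re-slice-and-re-join of the parts list by one running-prefix pass and one
-- back-to-front suffix pass whose results are zipped (objective: alternative decomposition).
-- Both Pythons are generators; the equivalence is about the list of yielded pairs.

-- ===== PORT A =====
def split_text_by_boundary_py (text : String) (boundary : String) (side : String) : List (String × String) :=
  let t := text.toList
  let b := boundary.toList
  let parts : List (List Char) :=
    if b ≠ [] then PySem.Chars.splitOn t b
    else if side == "right" then [t, []] else [[], t]
  if parts.length > 1 then
    (PySem.List.pyRange 1 (parts.length : Int)).foldl (fun acc i =>
      if side == "left" then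
        acc ++ [(String.ofList (PySem.Chars.join b (PySem.List.slice parts none (some i) ++ [[]])),
                 String.ofList (PySem.Chars.join b (PySem.List.slice parts (some i) none)))]
      else if side == "right" then
        acc ++ [(String.ofList (PySem.Chars.join b (PySem.List.slice parts none (some i))),
                 String.ofList (PySem.Chars.join b ([[]] ++ PySem.List.slice parts (some i) none)))]
      else acc  -- Python raises Exception("undefined side") here; those inputs are outside Pre_
      ) []
  else []

-- ===== PORT B =====
def split_text_by_boundary_py_alt (text : String) (boundary : String) (side : String) : List (String × String) :=
  let t := text.toList
  let b := boundary.toList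
  let parts : List (List Char) :=
    if b ≠ [] then PySem.Chars.splitOn t b
    else if side == "right" then [t, []] else [[], t]
  if parts.length < 2 then []
  else if side != "left" && side != "right" then []  -- Python raises Exception("undefined side"); outside Pre_
  else
    match parts with
    | p0 :: p1 :: tl =>
      let first := p0
      let mid := (p1 :: tl).dropLast           -- rest[:-1]
      let last := (p1 :: tl).getLastD []       -- rest[-1]; rest is nonempty, the default is never used
      let r1 := mid.foldl (fun (s : List Char × List (List Char)) p =>
                  (s.1 ++ b ++ p, s.2 ++ [s.1])) (first, [])
      let pres := r1.2 ++ [r1.1]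
      let r2 := mid.reverse.foldl (fun (s : List Char × List (List Char)) p =>
                  (p ++ b ++ s.1, s.2 ++ [s.1])) (last, [])
      let sufs := (r2.2 ++ [r2.1]).reverse
      if side == "left" then
        (pres.zip sufs).foldl (fun acc ps => acc ++ [(String.ofList (ps.1 ++ b), String.ofList ps.2)]) []
      else
        (pres.zip sufs).foldl (fun acc ps => acc ++ [(String.ofList ps.1, String.ofList (b ++ ps.2))]) []
    | _ => []  -- unreachable: parts.length ≥ 2

-- ===== PRECONDITION & SPEC =====
-- Pre_ excludes exactly the inputs on which the Python A raises Exception("undefined side"): a side other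
-- than "left"/"right" together with at least one split point (empty boundary, or boundary occurring in text).
-- B raises the same exception there.
def Pre_split_text_by_boundary_py (text : String) (boundary : String) (side : String) : Prop :=
  side = "left" ∨ side = "right" ∨ (boundary ≠ "" ∧ PySem.Str.isIn boundary text = false)
instance (text : String) (boundary : String) (side : String) : Decidable (Pre_split_text_by_boundary_py text boundary side) := by unfold Pre_split_text_by_boundary_py; infer_instance
def pvWitness_split_text_by_boundary_py : String × String × String := ("a,b,c", ",", "left")

def Spec_split_text_by_boundary_py (text : String) (boundary : String) (side : String) (out : List (String × String)) : Prop := out = split_text_by_boundary_py_alt text boundary side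
instance (text : String) (boundary : String) (side : String) (out : List (String × String)) : Decidable (Spec_split_text_by_boundary_py text boundary side out) := by unfold Spec_split_text_by_boundary_py; infer_instance

-- ===== CLAIM (what is proved, stated in full; the proofs are below) =====
def Claim_equal_split_text_by_boundary_py : Prop := ∀ (text : String) (boundary : String) (side : String), Dom_split_text_by_boundary_py text boundary side → Pre_split_text_by_boundary_py text boundary side → Spec_split_text_by_boundary_py text boundary side (split_text_by_boundary_py text boundary side)

-- ===== LEMMAS AND PROOFS =====

lemma join_pair (b x y : List Char) : PySem.Chars.join b [x, y] = x ++ b ++ y := by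
  rw [PySem.Chars.join_cons_cons, PySem.Chars.join_singleton]

lemma join_append_ne (b : List Char) (xs ys : List (List Char)) (hx : xs ≠ []) (hy : ys ≠ []) :
    PySem.Chars.join b (xs ++ ys) = PySem.Chars.join b xs ++ b ++ PySem.Chars.join b ys := by
  induction xs with
  | nil => exact absurd rfl hx
  | cons x t ih =>
    cases t with
    | nil =>
      cases ys with
      | nil => exact absurd rfl hy
      | cons y u =>
        simp only [List.singleton_append, PySem.Chars.join_cons_cons, PySem.Chars.join_singleton]
    | cons x2 t2 =>
      have h1 : ((x :: x2 :: t2) ++ ys) = x :: x2 :: (t2 ++ ys) := by simp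
      rw [h1, PySem.Chars.join_cons_cons]
      have h2 : (x2 :: (t2 ++ ys)) = (x2 :: t2) ++ ys := by simp
      rw [h2, ih (by simp), PySem.Chars.join_cons_cons]
      simp [List.append_assoc]

lemma join_concat_nil (b : List Char) (xs : List (List Char)) (hx : xs ≠ []) :
    PySem.Chars.join b (xs ++ [[]]) = PySem.Chars.join b xs ++ b := by
  rw [join_append_ne b xs [[]] hx (by simp), PySem.Chars.join_singleton]
  simp

lemma join_nil_cons (b : List Char) (ys : List (List Char)) (hy : ys ≠ []) :
    PySem.Chars.join b ([] :: ys) = b ++ PySem.Chars.join b ys := by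
  have h : ([] :: ys : List (List Char)) = [[]] ++ ys := by simp
  rw [h, join_append_ne b [[]] ys (by simp) hy, PySem.Chars.join_singleton]
  simp

lemma join_glue_head (b x y : List Char) (zs : List (List Char)) :
    PySem.Chars.join b ((x ++ b ++ y) :: zs) = PySem.Chars.join b (x :: y :: zs) := by
  cases zs with
  | nil => rw [PySem.Chars.join_singleton, join_pair]
  | cons z t =>
    rw [PySem.Chars.join_cons_cons, PySem.Chars.join_cons_cons, PySem.Chars.join_cons_cons]
    simp [List.append_assoc]

lemma join_glue_last (b : List Char) (xs : List (List Char)) (y z : List Char) :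
    PySem.Chars.join b (xs ++ [y ++ b ++ z]) = PySem.Chars.join b (xs ++ [y, z]) := by
  cases xs with
  | nil => simp only [List.nil_append, PySem.Chars.join_singleton, join_pair]
  | cons x t =>
    rw [join_append_ne b (x :: t) [y ++ b ++ z] (by simp) (by simp),
        join_append_ne b (x :: t) [y, z] (by simp) (by simp),
        PySem.Chars.join_singleton, join_pair]

lemma presFold (b : List Char) : ∀ (mid : List (List Char)) (s0 : List Char) (acc : List (List Char)),
    (mid.foldl (fun (s : List Char × List (List Char)) p => (s.1 ++ b ++ p, s.2 ++ [s.1])) (s0, acc)).2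
      ++ [(mid.foldl (fun (s : List Char × List (List Char)) p => (s.1 ++ b ++ p, s.2 ++ [s.1])) (s0, acc)).1]
    = acc ++ (List.range (mid.length + 1)).map (fun j => PySem.Chars.join b ((s0 :: mid).take (j + 1))) := by
  intro mid
  induction mid with
  | nil => intro s0 acc; simp [PySem.Chars.join_singleton]
  | cons m ms ih =>
    intro s0 acc
    simp only [List.foldl_cons]
    rw [ih (s0 ++ b ++ m) (acc ++ [s0])]
    simp only [List.length_cons]
    conv_rhs => rw [List.range_succ_eq_map]
    rw [List.map_cons, List.map_map]
    simp only [List.take_succ_cons, List.take_zero, PySem.Chars.join_singleton]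
    rw [List.append_assoc, List.singleton_append]
    refine congrArg (fun X => acc ++ X) ?_
    refine congrArg (List.cons s0) ?_
    apply List.map_congr_left
    intro j _
    simp only [Function.comp_apply, Nat.succ_eq_add_one, List.take_succ_cons]
    rw [join_glue_head]

lemma sufsFold (b : List Char) : ∀ (ms : List (List Char)) (s0 : List Char) (acc : List (List Char)),
    (ms.foldl (fun (s : List Char × List (List Char)) p => (p ++ b ++ s.1, s.2 ++ [s.1])) (s0, acc)).2
      ++ [(ms.foldl (fun (s : List Char × List (List Char)) p => (p ++ b ++ s.1, s.2 ++ [s.1])) (s0, acc)).1]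
    = acc ++ (List.range (ms.length + 1)).map (fun j => PySem.Chars.join b ((ms.take j).reverse ++ [s0])) := by
  intro ms
  induction ms with
  | nil => intro s0 acc; simp [PySem.Chars.join_singleton]
  | cons m mss ih =>
    intro s0 acc
    simp only [List.foldl_cons]
    rw [ih (m ++ b ++ s0) (acc ++ [s0])]
    simp only [List.length_cons]
    conv_rhs => rw [List.range_succ_eq_map]
    rw [List.map_cons, List.map_map]
    simp only [List.take_zero, List.reverse_nil, List.nil_append, PySem.Chars.join_singleton]
    rw [List.append_assoc, List.singleton_append]
    refine congrArg (fun X => acc ++ X) ?_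
    refine congrArg (List.cons s0) ?_
    apply List.map_congr_left
    intro j _
    simp only [Function.comp_apply, Nat.succ_eq_add_one, List.take_succ_cons, List.reverse_cons,
      List.append_assoc, List.singleton_append]
    rw [← List.append_assoc m b s0, join_glue_last]

lemma revMapRange {α : Type} (f : Nat → α) : ∀ (k : Nat),
    ((List.range k).map f).reverse = (List.range k).map (fun j => f (k - 1 - j)) := by
  intro k
  induction k with
  | zero => simp
  | succ k ih =>
    conv_lhs => rw [List.range_succ]
    conv_rhs => rw [List.range_succ_eq_map]
    simp only [List.map_append, List.reverse_append, List.map_cons, List.map_map,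
      List.reverse_singleton, List.singleton_append, List.map_nil]
    rw [ih]
    have h0 : k + 1 - 1 = k := by omega
    simp only [h0, Nat.sub_zero]
    congr 1
    apply List.map_congr_left
    intro j _
    simp only [Function.comp_apply, Nat.succ_eq_add_one]
    congr 1
    omega

lemma myRevTake {α : Type} (l : List α) (j : Nat) (_hj : j ≤ l.length) :
    (l.reverse.take (l.length - j)).reverse = l.drop j := by
  rw [← List.reverse_drop]
  simp

lemma pyRangeOne : ∀ (m : Nat),
    PySem.List.pyRange 1 ((m + 1 : Nat) : Int) = (List.range m).map (fun j => ((j + 1 : Nat) : Int)) := by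
  intro m
  induction m with
  | zero => decide
  | succ m ih =>
    have hcast : ((m + 1 + 1 : Nat) : Int) = ((m + 1 : Nat) : Int) + 1 := by push_cast; ring
    rw [hcast, PySem.List.pyRange_one_succ_right (by push_cast; omega)]
    rw [ih, List.range_succ, List.map_append]
    simp

lemma core_left (b p0 last : List Char) (mid : List (List Char)) :
    List.foldl
      (fun acc i =>
        acc ++ [(String.ofList (PySem.Chars.join b (PySem.List.slice (p0 :: (mid ++ [last])) none (some i) ++ [[]])),
                 String.ofList (PySem.Chars.join b (PySem.List.slice (p0 :: (mid ++ [last])) (some i) none)))])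
      []
      (PySem.List.pyRange 1 ((p0 :: (mid ++ [last])).length : Int))
    =
    List.foldl
      (fun acc ps => acc ++ [(String.ofList (ps.1 ++ b), String.ofList ps.2)])
      []
      (List.zip
        ((List.foldl (fun (s : List Char × List (List Char)) p => (s.1 ++ b ++ p, s.2 ++ [s.1])) (p0, []) mid).2
          ++ [(List.foldl (fun (s : List Char × List (List Char)) p => (s.1 ++ b ++ p, s.2 ++ [s.1])) (p0, []) mid).1])
        (((List.foldl (fun (s : List Char × List (List Char)) p => (p ++ b ++ s.1, s.2 ++ [s.1])) (last, []) mid.reverse).2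
          ++ [(List.foldl (fun (s : List Char × List (List Char)) p => (p ++ b ++ s.1, s.2 ++ [s.1])) (last, []) mid.reverse).1]).reverse)) := by
  rw [PySem.List.foldl_append_singleton_eq_map, List.nil_append]
  have hlen : (p0 :: (mid ++ [last])).length = mid.length + 1 + 1 := by simp
  rw [hlen, pyRangeOne (mid.length + 1), List.map_map]
  rw [presFold b mid p0 [], sufsFold b mid.reverse last []]
  simp only [List.nil_append, List.length_reverse]
  rw [revMapRange]
  rw [List.zip_map']
  rw [PySem.List.foldl_append_singleton_eq_map, List.nil_append, List.map_map]
  apply List.map_congr_left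
  intro j hj
  have hjm : j < mid.length + 1 := List.mem_range.mp hj
  simp only [Function.comp_apply]
  rw [PySem.List.slice_to_natCast, PySem.List.slice_from_natCast]
  simp only [List.take_succ_cons, List.drop_succ_cons]
  rw [List.take_append_of_le_length (by omega), List.drop_append_of_le_length (by omega)]
  have e3 : mid.length + 1 - 1 - j = mid.length - j := by omega
  rw [e3, myRevTake mid j (by omega)]
  rw [join_concat_nil b _ (by simp)]

lemma core_right (b p0 last : List Char) (mid : List (List Char)) :
    List.foldl
      (fun acc i =>
        acc ++ [(String.ofList (PySem.Chars.join b (PySem.List.slice (p0 :: (mid ++ [last])) none (some i))),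
                 String.ofList (PySem.Chars.join b ([[]] ++ PySem.List.slice (p0 :: (mid ++ [last])) (some i) none)))])
      []
      (PySem.List.pyRange 1 ((p0 :: (mid ++ [last])).length : Int))
    =
    List.foldl
      (fun acc ps => acc ++ [(String.ofList ps.1, String.ofList (b ++ ps.2))])
      []
      (List.zip
        ((List.foldl (fun (s : List Char × List (List Char)) p => (s.1 ++ b ++ p, s.2 ++ [s.1])) (p0, []) mid).2
          ++ [(List.foldl (fun (s : List Char × List (List Char)) p => (s.1 ++ b ++ p, s.2 ++ [s.1])) (p0, []) mid).1])
        (((List.foldl (fun (s : List Char × List (List Char)) p => (p ++ b ++ s.1, s.2 ++ [s.1])) (last, []) mid.reverse).2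
          ++ [(List.foldl (fun (s : List Char × List (List Char)) p => (p ++ b ++ s.1, s.2 ++ [s.1])) (last, []) mid.reverse).1]).reverse)) := by
  rw [PySem.List.foldl_append_singleton_eq_map, List.nil_append]
  have hlen : (p0 :: (mid ++ [last])).length = mid.length + 1 + 1 := by simp
  rw [hlen, pyRangeOne (mid.length + 1), List.map_map]
  rw [presFold b mid p0 [], sufsFold b mid.reverse last []]
  simp only [List.nil_append, List.length_reverse]
  rw [revMapRange]
  rw [List.zip_map']
  rw [PySem.List.foldl_append_singleton_eq_map, List.nil_append, List.map_map]
  apply List.map_congr_left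
  intro j hj
  have hjm : j < mid.length + 1 := List.mem_range.mp hj
  simp only [Function.comp_apply]
  rw [PySem.List.slice_to_natCast, PySem.List.slice_from_natCast]
  simp only [List.take_succ_cons, List.drop_succ_cons, List.singleton_append]
  rw [List.take_append_of_le_length (by omega), List.drop_append_of_le_length (by omega)]
  have e3 : mid.length + 1 - 1 - j = mid.length - j := by omega
  rw [e3, myRevTake mid j (by omega)]
  rw [join_nil_cons b _ (by simp)]

lemma left_eq (text boundary : String) :
    split_text_by_boundary_py text boundary "left" = split_text_by_boundary_py_alt text boundary "left" := by
  unfold split_text_by_boundary_py split_text_by_boundary_py_alt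
  simp only []
  by_cases hb : boundary.toList = []
  · have hpe : (if boundary.toList ≠ [] then PySem.Chars.splitOn text.toList boundary.toList
        else if (("left" : String) == "right") = true then [text.toList, []] else [[], text.toList])
        = [[], text.toList] := by
      rw [if_neg (by simp [hb]), if_neg (by decide)]
    rw [hpe]
    rw [if_pos (by simp : ([[], text.toList] : List (List Char)).length > 1),
        if_neg (by simp : ¬ ([[], text.toList] : List (List Char)).length < 2)]
    exact core_left boundary.toList [] text.toList []
  · have hpe : (if boundary.toList ≠ [] then PySem.Chars.splitOn text.toList boundary.toList
        else if (("left" : String) == "right") = true then [text.toList, []] else [[], text.toList])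
        = PySem.Chars.splitOn text.toList boundary.toList := if_pos hb
    rw [hpe]
    generalize PySem.Chars.splitOn text.toList boundary.toList = parts
    rcases parts with _ | ⟨p0, _ | ⟨p1, tl⟩⟩
    · rw [if_neg (by simp : ¬ ([] : List (List Char)).length > 1),
          if_pos (by simp : ([] : List (List Char)).length < 2)]
    · rw [if_neg (by simp : ¬ ([p0] : List (List Char)).length > 1),
          if_pos (by simp : ([p0] : List (List Char)).length < 2)]
    · rw [if_pos (by simp only [List.length_cons]; omega : (p0 :: p1 :: tl).length > 1),
          if_neg (by simp only [List.length_cons]; omega : ¬ (p0 :: p1 :: tl).length < 2)]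
      dsimp only
      obtain ⟨mid, last, hml⟩ : ∃ mid last, p1 :: tl = mid ++ [last] :=
        ⟨(p1 :: tl).dropLast, (p1 :: tl).getLast (by simp),
          (List.dropLast_append_getLast (by simp)).symm⟩
      rw [hml, List.dropLast_concat, List.getLastD_concat]
      exact core_left boundary.toList p0 last mid

lemma right_eq (text boundary : String) :
    split_text_by_boundary_py text boundary "right" = split_text_by_boundary_py_alt text boundary "right" := by
  unfold split_text_by_boundary_py split_text_by_boundary_py_alt
  simp only []
  by_cases hb : boundary.toList = []
  · have hpe : (if boundary.toList ≠ [] then PySem.Chars.splitOn text.toList boundary.toList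
        else if (("right" : String) == "right") = true then [text.toList, []] else [[], text.toList])
        = [text.toList, []] := by
      rw [if_neg (by simp [hb]), if_pos (by decide)]
    rw [hpe]
    rw [if_pos (by simp : ([text.toList, []] : List (List Char)).length > 1),
        if_neg (by simp : ¬ ([text.toList, []] : List (List Char)).length < 2)]
    exact core_right boundary.toList text.toList [] []
  · have hpe : (if boundary.toList ≠ [] then PySem.Chars.splitOn text.toList boundary.toList
        else if (("right" : String) == "right") = true then [text.toList, []] else [[], text.toList])
        = PySem.Chars.splitOn text.toList boundary.toList := if_pos hb
    rw [hpe]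
    generalize PySem.Chars.splitOn text.toList boundary.toList = parts
    rcases parts with _ | ⟨p0, _ | ⟨p1, tl⟩⟩
    · rw [if_neg (by simp : ¬ ([] : List (List Char)).length > 1),
          if_pos (by simp : ([] : List (List Char)).length < 2)]
    · rw [if_neg (by simp : ¬ ([p0] : List (List Char)).length > 1),
          if_pos (by simp : ([p0] : List (List Char)).length < 2)]
    · rw [if_pos (by simp only [List.length_cons]; omega : (p0 :: p1 :: tl).length > 1),
          if_neg (by simp only [List.length_cons]; omega : ¬ (p0 :: p1 :: tl).length < 2)]
      dsimp only
      obtain ⟨mid, last, hml⟩ : ∃ mid last, p1 :: tl = mid ++ [last] :=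
        ⟨(p1 :: tl).dropLast, (p1 :: tl).getLast (by simp),
          (List.dropLast_append_getLast (by simp)).symm⟩
      rw [hml, List.dropLast_concat, List.getLastD_concat]
      exact core_right boundary.toList p0 last mid

lemma other_eq (text boundary side : String) (h1 : side ≠ "left") (h2 : side ≠ "right") :
    split_text_by_boundary_py text boundary side = split_text_by_boundary_py_alt text boundary side := by
  unfold split_text_by_boundary_py split_text_by_boundary_py_alt
  have e1 : (side == "left") = false := by simp [beq_eq_false_iff_ne, h1]
  have e2 : (side == "right") = false := by simp [beq_eq_false_iff_ne, h2]
  simp [e1, e2, bne, ite_self]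

-- ===== VERDICT (by name: the statement is the Claim_ definition above) =====
theorem split_text_by_boundary_py_spec : Claim_equal_split_text_by_boundary_py := by
  intro text boundary side _ _
  unfold Spec_split_text_by_boundary_py
  by_cases h1 : side = "left"
  · subst h1; exact left_eq text boundary
  · by_cases h2 : side = "right"
    · subst h2; exact right_eq text boundary
    · exact other_eq text boundary side h1 h2
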